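-- pv_equiv track=rewrite | github.com/thq1005/secure_soc | python/rv32i_asm.py | get_addr
-- ===== SOURCE A (Python) =====
-- def get_addr(cleaned_code):
--
--     addr = {}
--     current_address = 0
--
--     for line in cleaned_code:
--         if line.endswith(":"):
--             # Nếu là nhãn, lưu địa chỉ của nhãn
--             addr[line] = current_address
--         else:
--             # Nếu là lệnh, lưu địa chỉ của lệnh và tăng địa chỉ hiện tại lên 4 byte
--             addr[line] = current_address
--             current_address += 4
--
--     return addr
-- ===== SOURCE B (Python) =====
-- def get_addr(cleaned_code):
--     # address table first: 0-increment for labels, 4 for instructions,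
--     # then exclusive prefix sums; finally one zip into a dict
--     incs = [0 if line.endswith(":") else 4 for line in cleaned_code]
--     addrs = exclusive_prefix_sums(incs)
--     return dict(zip(cleaned_code, addrs))
--
-- def exclusive_prefix_sums(xs):
--     out = []
--     total = 0
--     for x in xs:
--         out.append(total)
--         total += x
--     return out
-- ===== Notes on version B (the rewrite author's own statement) =====
-- stated objective: alternative
-- what changed: B replaces the mutable running-counter-plus-dict loop by a three-stage pipeline: a per-line increment list, an exclusive prefix-sum address list, and a single dict(zip(...)) construction.
import Mathlib
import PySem

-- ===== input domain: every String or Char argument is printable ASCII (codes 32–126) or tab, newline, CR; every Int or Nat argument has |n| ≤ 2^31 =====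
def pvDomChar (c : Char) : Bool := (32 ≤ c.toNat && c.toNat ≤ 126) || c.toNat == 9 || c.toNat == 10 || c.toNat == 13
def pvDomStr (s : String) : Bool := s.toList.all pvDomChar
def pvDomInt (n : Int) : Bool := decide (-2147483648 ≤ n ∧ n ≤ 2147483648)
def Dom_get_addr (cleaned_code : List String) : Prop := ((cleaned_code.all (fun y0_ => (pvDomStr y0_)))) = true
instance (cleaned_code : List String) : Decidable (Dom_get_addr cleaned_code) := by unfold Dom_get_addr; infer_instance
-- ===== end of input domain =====

-- B replaces A's mutable running counter by an increment list, an exclusive prefix-sum address list, and one dict(zip) pass (alternative decomposition; return value proved equal).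
-- ===== PORT A =====
def get_addr (cleaned_code : List String) : List (String × Int) :=
  (cleaned_code.foldl
    (fun (st : PySem.Dict String Int × Int) line =>
      if PySem.Str.endswith line ":" then
        (st.1.insert line st.2, st.2)
      else
        (st.1.insert line st.2, st.2 + 4))
    (PySem.Dict.empty, 0)).1.items

-- ===== PORT B =====
-- exclusive_prefix_sums in Source B: append-loop ported as the obvious structural scan over the same running total
def exclusive_prefix_sums (total : Int) : List Int → List Int
  | [] => []
  | x :: rest => total :: exclusive_prefix_sums (total + x) rest

def get_addr_alt (cleaned_code : List String) : List (String × Int) :=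
  let incs : List Int := cleaned_code.map (fun line => if PySem.Str.endswith line ":" then 0 else 4)
  let addrs : List Int := exclusive_prefix_sums 0 incs
  (PySem.Dict.ofList (cleaned_code.zip addrs)).items

-- ===== PRECONDITION & SPEC =====
def Spec_get_addr (cleaned_code : List String) (out : List (String × Int)) : Prop := out = get_addr_alt cleaned_code
instance (cleaned_code : List String) (out : List (String × Int)) : Decidable (Spec_get_addr cleaned_code out) := by unfold Spec_get_addr; infer_instance

-- ===== CLAIM (what is proved, stated in full; the proofs are below) =====
def Claim_equal_get_addr : Prop := ∀ (cleaned_code : List String), Dom_get_addr cleaned_code → Spec_get_addr cleaned_code (get_addr cleaned_code)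

-- ===== LEMMAS AND PROOFS =====

-- exclusive prefix sums of per-line increments, starting at c (proof-side helper)
def addrList (c : Int) : List String → List Int
  | [] => []
  | line :: rest =>
      c :: addrList (if PySem.Str.endswith line ":" then c else c + 4) rest

theorem foldl_eq_zip_addrList (cc : List String) (d : PySem.Dict String Int) (c : Int) :
    (cc.foldl
      (fun (st : PySem.Dict String Int × Int) line =>
        if PySem.Str.endswith line ":" then
          (st.1.insert line st.2, st.2)
        else
          (st.1.insert line st.2, st.2 + 4))
      (d, c)).1
    = (cc.zip (addrList c cc)).foldl (fun d p => d.insert p.1 p.2) d := by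
  induction cc generalizing d c with
  | nil => rfl
  | cons line rest ih =>
      by_cases h : PySem.Str.endswith line ":"
      · simp only [List.foldl_cons, addrList, if_pos h, List.zip_cons_cons]
        exact ih _ _
      · simp only [List.foldl_cons, addrList, if_neg h, List.zip_cons_cons]
        exact ih _ _

theorem addrList_eq_scan (cc : List String) (c : Int) :
    addrList c cc
    = exclusive_prefix_sums c (cc.map (fun line => if PySem.Str.endswith line ":" then (0:Int) else 4)) := by
  induction cc generalizing c with
  | nil => rfl
  | cons line rest ih =>
      simp only [addrList, List.map_cons, exclusive_prefix_sums]
      refine List.cons_eq_cons.mpr ⟨rfl, ?_⟩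
      rw [ih]
      split_ifs <;> norm_num

-- ===== VERDICT (by name: the statement is the Claim_ definition above) =====
theorem get_addr_spec : Claim_equal_get_addr := by
  intro cc _
  unfold Spec_get_addr get_addr get_addr_alt
  rw [foldl_eq_zip_addrList cc PySem.Dict.empty 0, addrList_eq_scan]
  rfl
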